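-- pv_equiv track=rewrite | github.com/megazord-studio/hf_inference | app/core/runners/multimodal.py | _detect_arch
-- ===== SOURCE A (Python) =====
-- def _detect_arch(model_id: str) -> str:
--     mid = model_id.lower()
--     if "blip" in mid:
--         return "blip"
--     if "llava" in mid:
--         return "llava"
--     if any(k in mid for k in ["qwen-vl", "qwen/vl", "qwen-vl-chat"]):
--         return "qwen_vl"
--     # Broaden MiniCPM detection to catch IDs like openbmb/MiniCPM-Llama3-V-2_5
--     if any(k in mid for k in ["minicpm", "minicpm-v", "minicpm_v", "minicpm-o", "minicpmv"]):
--         return "minicpm_vlm"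
--     # New model architectures
--     if "yi-vl" in mid or "yi/vl" in mid:
--         return "yi_vl"
--     if "internvl" in mid:
--         return "internvl"
--     if "kosmos-2" in mid or "kosmos2" in mid:
--         return "kosmos2"
--     if "florence-2" in mid or "florence2" in mid:
--         return "florence2"
--     if "cogvlm" in mid:
--         return "cogvlm"
--     if any(k in mid for k in ["idefics", "paligemma", "vl-", "vision-language", "gemma"]):
--         return "vlm"
--     return "generic_vqa"
-- ===== SOURCE B (Python) =====
-- # keyword -> (priority, label); lower priority wins (A's cascade order)
-- KEYWORDS = {
--     "blip": (0, "blip"),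
--     "llava": (1, "llava"),
--     "qwen-vl": (2, "qwen_vl"),
--     "qwen/vl": (2, "qwen_vl"),
--     "qwen-vl-chat": (2, "qwen_vl"),
--     "minicpm": (3, "minicpm_vlm"),
--     "minicpm-v": (3, "minicpm_vlm"),
--     "minicpm_v": (3, "minicpm_vlm"),
--     "minicpm-o": (3, "minicpm_vlm"),
--     "minicpmv": (3, "minicpm_vlm"),
--     "yi-vl": (4, "yi_vl"),
--     "yi/vl": (4, "yi_vl"),
--     "internvl": (5, "internvl"),
--     "kosmos-2": (6, "kosmos2"),
--     "kosmos2": (6, "kosmos2"),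
--     "florence-2": (7, "florence2"),
--     "florence2": (7, "florence2"),
--     "cogvlm": (8, "cogvlm"),
--     "idefics": (9, "vlm"),
--     "paligemma": (9, "vlm"),
--     "vl-": (9, "vlm"),
--     "vision-language": (9, "vlm"),
--     "gemma": (9, "vlm"),
-- }
--
-- def _detect_arch(model_id: str) -> str:
--     mid = model_id.lower()
--     best = min((v for k, v in KEYWORDS.items() if k in mid),
--                default=(10, "generic_vqa"))
--     return best[1]
-- ===== Notes on version B (the rewrite author's own statement) =====
-- stated objective: alternative
-- what changed: Replaces A's early-return if-cascade with a flat keyword->(priority,label) map and a single min() over all matching keywords, returning the lowest-priority (i.e. highest-precedence) label; correct because A's first-match-wins cascade equals the minimum-priority match.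
import Mathlib
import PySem

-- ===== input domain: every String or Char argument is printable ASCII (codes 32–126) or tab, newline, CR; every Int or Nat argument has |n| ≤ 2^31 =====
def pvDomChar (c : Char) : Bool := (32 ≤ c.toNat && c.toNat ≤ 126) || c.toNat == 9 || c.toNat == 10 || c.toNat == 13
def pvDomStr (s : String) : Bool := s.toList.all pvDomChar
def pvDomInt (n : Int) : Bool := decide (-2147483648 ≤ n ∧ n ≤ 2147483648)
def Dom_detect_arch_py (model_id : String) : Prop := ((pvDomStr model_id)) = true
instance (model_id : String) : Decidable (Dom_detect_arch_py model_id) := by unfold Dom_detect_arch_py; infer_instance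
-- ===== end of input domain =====

-- B replaces A's early-return if-cascade with a flat keyword->(priority,label) table and a min() over all matches; alternative decomposition, same results.


-- ===== PORT A =====
def detect_arch_py (model_id : String) : String :=
  let mid := PySem.Str.lower model_id
  if PySem.Str.isIn "blip" mid then "blip"
  else if PySem.Str.isIn "llava" mid then "llava"
  else if (["qwen-vl", "qwen/vl", "qwen-vl-chat"] : List String).any (fun k => PySem.Str.isIn k mid) then "qwen_vl"
  else if (["minicpm", "minicpm-v", "minicpm_v", "minicpm-o", "minicpmv"] : List String).any (fun k => PySem.Str.isIn k mid) then "minicpm_vlm"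
  else if PySem.Str.isIn "yi-vl" mid || PySem.Str.isIn "yi/vl" mid then "yi_vl"
  else if PySem.Str.isIn "internvl" mid then "internvl"
  else if PySem.Str.isIn "kosmos-2" mid || PySem.Str.isIn "kosmos2" mid then "kosmos2"
  else if PySem.Str.isIn "florence-2" mid || PySem.Str.isIn "florence2" mid then "florence2"
  else if PySem.Str.isIn "cogvlm" mid then "cogvlm"
  else if (["idefics", "paligemma", "vl-", "vision-language", "gemma"] : List String).any (fun k => PySem.Str.isIn k mid) then "vlm"
  else "generic_vqa"

-- ===== PORT B =====
-- the KEYWORDS dict: keyword -> (priority, label), in Source B's insertion order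
def pvKeywords : List (String × Nat × String) :=
  [ ("blip", 0, "blip"),
    ("llava", 1, "llava"),
    ("qwen-vl", 2, "qwen_vl"),
    ("qwen/vl", 2, "qwen_vl"),
    ("qwen-vl-chat", 2, "qwen_vl"),
    ("minicpm", 3, "minicpm_vlm"),
    ("minicpm-v", 3, "minicpm_vlm"),
    ("minicpm_v", 3, "minicpm_vlm"),
    ("minicpm-o", 3, "minicpm_vlm"),
    ("minicpmv", 3, "minicpm_vlm"),
    ("yi-vl", 4, "yi_vl"),
    ("yi/vl", 4, "yi_vl"),
    ("internvl", 5, "internvl"),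
    ("kosmos-2", 6, "kosmos2"),
    ("kosmos2", 6, "kosmos2"),
    ("florence-2", 7, "florence2"),
    ("florence2", 7, "florence2"),
    ("cogvlm", 8, "cogvlm"),
    ("idefics", 9, "vlm"),
    ("paligemma", 9, "vlm"),
    ("vl-", 9, "vlm"),
    ("vision-language", 9, "vlm"),
    ("gemma", 9, "vlm") ]

-- Source B's min() over the matching (priority, label) pairs with a default: a left fold
-- keeping the smaller pair (first one on a tie).  Python compares the tuples
-- lexicographically; comparing only the priorities is exact here because entries with
-- equal priority carry the same label.
def pvFoldMin (mid : String) : List (String × Nat × String) → (Nat × String) → (Nat × String)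
  | [], best => best
  | (kw, p, lbl) :: rest, best =>
      pvFoldMin mid rest
        (if PySem.Str.isIn kw mid then (if p < best.1 then (p, lbl) else best) else best)

def detect_arch_py_alt (model_id : String) : String :=
  (pvFoldMin (PySem.Str.lower model_id) pvKeywords (10, "generic_vqa")).2

-- ===== PRECONDITION & SPEC =====
def Spec_detect_arch_py (model_id : String) (out : String) : Prop := out = detect_arch_py_alt model_id
instance (model_id : String) (out : String) : Decidable (Spec_detect_arch_py model_id out) := by unfold Spec_detect_arch_py; infer_instance

-- ===== CLAIM (what is proved, stated in full; the proofs are below) =====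
def Claim_equal_detect_arch_py : Prop := ∀ (model_id : String), Dom_detect_arch_py model_id → Spec_detect_arch_py model_id (detect_arch_py model_id)

-- ===== LEMMAS AND PROOFS =====

-- first matching entry of the table (the shape of A's cascade), proof helper only
def pvFirst (mid : String) : List (String × Nat × String) → Option (Nat × String)
  | [] => none
  | (kw, p, lbl) :: rest =>
      if PySem.Str.isIn kw mid then some (p, lbl) else pvFirst mid rest

-- once the accumulator's priority is ≤ every remaining priority, the fold is constant
lemma pvFoldMin_stay (mid : String) (l : List (String × Nat × String)) (best : Nat × String)
    (h : ∀ x ∈ l, best.1 ≤ x.2.1) : pvFoldMin mid l best = best := by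
  induction l with
  | nil => rfl
  | cons a rest ih =>
    obtain ⟨kw, p, lbl⟩ := a
    have hp : ¬ p < best.1 := Nat.not_lt_of_ge (h _ (List.mem_cons_self ..))
    simp only [pvFoldMin, if_neg hp, ite_self]
    exact ih (fun x hx => h x (List.mem_cons_of_mem _ hx))

-- on a priority-nondecreasing table whose priorities all beat the default, the
-- min-fold returns the FIRST matching entry (or the default)
lemma pvFoldMin_first (mid : String) (l : List (String × Nat × String)) (best : Nat × String)
    (hp : List.Pairwise (fun a b => a.2.1 ≤ b.2.1) l)
    (hb : ∀ x ∈ l, x.2.1 < best.1) :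
    pvFoldMin mid l best = (pvFirst mid l).getD best := by
  induction l generalizing best with
  | nil => rfl
  | cons a rest ih =>
    obtain ⟨kw, p, lbl⟩ := a
    rcases List.pairwise_cons.mp hp with ⟨hhd, hrest⟩
    by_cases hin : PySem.Str.isIn kw mid
    · simp only [pvFoldMin, pvFirst, hin, if_true,
        if_pos (hb _ (List.mem_cons_self ..)), Option.getD_some]
      exact pvFoldMin_stay mid rest (p, lbl) (fun x hx => hhd x hx)
    · simp only [pvFoldMin, pvFirst, hin]
      exact ih best hrest (fun x hx => hb x (List.mem_cons_of_mem _ hx))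

-- flattening an 'or' branch of A's cascade into two nested ifs
lemma pv_or_ite {α : Type} (p q : Prop) [Decidable p] [Decidable q] (x y : α) :
    (if p ∨ q then x else y) = if p then x else if q then x else y := by
  by_cases hp : p <;> by_cases hq : q <;> simp [hp, hq]

-- ===== VERDICT (by name: the statement is the Claim_ definition above) =====
set_option maxHeartbeats 2000000 in
theorem detect_arch_py_spec : Claim_equal_detect_arch_py := by
  intro m _
  unfold Spec_detect_arch_py detect_arch_py detect_arch_py_alt
  rw [pvFoldMin_first _ _ _ (by unfold pvKeywords; decide) (by unfold pvKeywords; decide)]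
  simp only [pvFirst, pvKeywords]
  simp only [apply_ite (fun o : Option (Nat × String) => o.getD ((10 : Nat), ("generic_vqa" : String))),
    Option.getD_some, Option.getD_none]
  simp only [apply_ite (Prod.snd (α := Nat) (β := String))]
  simp only [List.any_cons, List.any_nil, Bool.or_false, Bool.or_eq_true, pv_or_ite]
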